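-- pv_equiv track=rewrite | github.com/qinghao1/Kattis | deduplicatingfiles.py | process
-- ===== SOURCE A (Python) =====
-- def process(array):
--     collisions = 0
--     unrepeated = len(set(array))
--     for i in range(len(array)):
--         for j in range(i + 1, len(array)):
--             if array[i] != array[j]:
--                 collisions += 1
--
--     return unrepeated, collisions
-- ===== SOURCE B (Python) =====
-- def process(array):
--     # One pass: for each element, pairs it forms with *earlier* different
--     # elements = (index) - (occurrences of the same value so far).
--     counts = {}
--     collisions = 0
--     for i, x in enumerate(array):
--         c = counts.get(x, 0)
--         collisions += i - c
--         counts[x] = c + 1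
--     return len(counts), collisions
-- ===== Notes on version B (the rewrite author's own statement) =====
-- stated objective: faster
-- what changed: replaces the quadratic double index loop by a single pass with a frequency dict: each element contributes (its index minus the count of equal values seen so far) unequal pairs, and the distinct count is the dict's size
import Mathlib
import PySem

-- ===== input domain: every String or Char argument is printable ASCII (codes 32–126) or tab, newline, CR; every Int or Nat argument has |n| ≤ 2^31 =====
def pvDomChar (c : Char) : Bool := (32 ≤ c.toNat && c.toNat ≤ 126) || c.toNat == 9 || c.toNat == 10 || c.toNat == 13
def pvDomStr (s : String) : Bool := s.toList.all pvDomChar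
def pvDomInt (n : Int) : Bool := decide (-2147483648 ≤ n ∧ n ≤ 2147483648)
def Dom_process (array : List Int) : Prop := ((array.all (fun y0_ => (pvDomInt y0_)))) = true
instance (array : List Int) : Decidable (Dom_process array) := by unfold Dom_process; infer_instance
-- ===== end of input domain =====

-- B replaces A's quadratic double index loop by a single pass with a frequency dict (objective: faster, measured).

-- ===== PORT A =====
def process (array : List Int) : Int × Int :=
  let collisions : Int := 0
  let unrepeated : Int := ((PySem.Set.ofList array).length : Int)
  let collisions := (PySem.List.pyRange 0 (array.length : Int)).foldl
    (fun collisions i =>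
      (PySem.List.pyRange (i + 1) (array.length : Int)).foldl
        (fun collisions j =>
          if PySem.List.pyGetD array i 0 ≠ PySem.List.pyGetD array j 0 then
            collisions + 1
          else collisions)
        collisions)
    collisions
  (unrepeated, collisions)

-- ===== PORT B =====
def process_alt (array : List Int) : Int × Int :=
  let st := (PySem.List.enumerate array).foldl
    (fun st p =>
      let c := st.1.getD p.2 0
      (st.1.insert p.2 (c + 1), st.2 + p.1 - c))
    ((PySem.Dict.empty : PySem.Dict Int Int), (0 : Int))
  ((st.1.size : Int), st.2)

-- ===== PRECONDITION & SPEC =====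
def Spec_process (array : List Int) (out : Int × Int) : Prop := out = process_alt array
instance (array : List Int) (out : Int × Int) : Decidable (Spec_process array out) := by unfold Spec_process; infer_instance

-- ===== CLAIM (what is proved, stated in full; the proofs are below) =====
def Claim_equal_process : Prop := ∀ (array : List Int), Dom_process array → Spec_process array (process array)

-- ===== LEMMAS AND PROOFS =====

/-- The number of ordered pairs i < j with different values, recursing on the head. -/
def mismatchPairs : List Int → Int
  | [] => 0
  | x :: xs => (xs.countP (fun y => decide (x ≠ y)) : Int) + mismatchPairs xs

lemma mismatchPairs_snoc (l : List Int) (x : Int) :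
    mismatchPairs (l ++ [x]) = mismatchPairs l + (l.length : Int) - (l.count x : Int) := by
  induction l with
  | nil => simp [mismatchPairs]
  | cons y l ih =>
    by_cases h : y = x <;>
      simp [mismatchPairs, List.countP_append, ih, h] <;> ring

lemma enumerate_snoc (l : List Int) (x : Int) (s : Int) :
    PySem.List.enumerate (l ++ [x]) s = PySem.List.enumerate l s ++ [(s + (l.length : Int), x)] := by
  induction l generalizing s with
  | nil => simp [PySem.List.enumerate]
  | cons y l ih =>
    simp [PySem.List.enumerate, ih]
    ring

lemma modify_eq_insert_getD (d : PySem.Dict Int Int) (x : Int) :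
    d.modify x 0 (· + 1) = d.insert x (d.getD x 0 + 1) := rfl

lemma alt_fold (l : List Int) :
    (PySem.List.enumerate l).foldl
      (fun st p =>
        let c := st.1.getD p.2 0
        (st.1.insert p.2 (c + 1), st.2 + p.1 - c))
      ((PySem.Dict.empty : PySem.Dict Int Int), (0 : Int))
      = (PySem.Dict.counter l, mismatchPairs l) := by
  induction l using List.reverseRecOn with
  | nil => rfl
  | append_singleton l x ih =>
    rw [enumerate_snoc, List.foldl_append, ih]
    simp only [PySem.Dict.counter_append_singleton, modify_eq_insert_getD,
      mismatchPairs_snoc, PySem.Dict.getD_counter, List.foldl_cons, List.foldl_nil,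
      Prod.mk.injEq]
    exact ⟨trivial, by ring⟩

lemma sum_drop_counts (a : List Int) :
    ((List.range a.length).map
        (fun i => ((a.drop (i + 1)).countP (fun y => decide (a.getD i 0 ≠ y)) : Int))).sum
      = mismatchPairs a := by
  induction a with
  | nil => simp [mismatchPairs]
  | cons x xs ih =>
    rw [List.length_cons, List.range_succ_eq_map]
    simp only [List.map_cons, List.map_map, List.sum_cons]
    have h2 : ∀ i : Nat,
        (((x :: xs).drop (i + 1 + 1)).countP (fun y => decide ((x :: xs).getD (i + 1) 0 ≠ y)) : Int)
          = ((xs.drop (i + 1)).countP (fun y => decide (xs.getD i 0 ≠ y)) : Int) := by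
      intro i
      simp [List.drop_succ_cons]
    simp only [Function.comp_def, Nat.succ_eq_add_one, h2, ih]
    simp [mismatchPairs]

lemma process_collisions (array : List Int) :
    (PySem.List.pyRange 0 (array.length : Int)).foldl
      (fun collisions i =>
        (PySem.List.pyRange (i + 1) (array.length : Int)).foldl
          (fun collisions j =>
            if PySem.List.pyGetD array i 0 ≠ PySem.List.pyGetD array j 0 then
              collisions + 1
            else collisions)
          collisions)
      0 = mismatchPairs array := by
  have hcongr : ∀ (coll : Int), ∀ i ∈ PySem.List.pyRange 0 (array.length : Int),
      (PySem.List.pyRange (i + 1) (array.length : Int)).foldl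
        (fun collisions j =>
          if PySem.List.pyGetD array i 0 ≠ PySem.List.pyGetD array j 0 then
            collisions + 1
          else collisions)
        coll
        = coll + (((array.drop (i + 1).toNat)).countP
            (fun y => decide (PySem.List.pyGetD array i 0 ≠ y)) : Int) := by
    intro coll i hi
    have h0 : (0 : Int) ≤ i + 1 := by
      have := (PySem.List.mem_pyRange_one.mp hi).1
      omega
    rw [PySem.List.foldl_pyRange_pyGetD' array 0
      (fun acc y => if PySem.List.pyGetD array i 0 ≠ y then acc + 1 else acc) coll h0]
    rw [PySem.List.foldl_ite_add_one (fun y => PySem.List.pyGetD array i 0 ≠ y)]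
  rw [PySem.List.foldl_congr_mem (PySem.List.pyRange 0 (array.length : Int)) _
    (fun coll i => coll + (((array.drop (i + 1).toNat)).countP
      (fun y => decide (PySem.List.pyGetD array i 0 ≠ y)) : Int)) 0 hcongr]
  rw [PySem.List.pyRange_zero_natCast, List.foldl_map]
  have hstep : ∀ (coll : Int), ∀ i ∈ List.range array.length,
      coll + (((array.drop (((i : Int)) + 1).toNat)).countP
          (fun y => decide (PySem.List.pyGetD array (i : Int) 0 ≠ y)) : Int)
        = coll + ((array.drop (i + 1)).countP (fun y => decide (array.getD i 0 ≠ y)) : Int) := by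
    intro coll i _
    have ht : ((i : Int) + 1).toNat = i + 1 := by omega
    simp [ht, PySem.List.pyGetD_natCast]
  rw [PySem.List.foldl_congr_mem (List.range array.length) _
    (fun coll i => coll + ((array.drop (i + 1)).countP
      (fun y => decide (array.getD i 0 ≠ y)) : Int)) 0 hstep]
  rw [PySem.List.foldl_add (List.range array.length)
    (fun i => ((array.drop (i + 1)).countP (fun y => decide (array.getD i 0 ≠ y)) : Int)) 0]
  rw [zero_add, sum_drop_counts]

lemma process_alt_eq (array : List Int) :
    process_alt array = (((PySem.Set.ofList array).length : Int), mismatchPairs array) := by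
  unfold process_alt
  rw [alt_fold]
  simp [PySem.Dict.size, PySem.Dict.items_counter]

-- ===== VERDICT (by name: the statement is the Claim_ definition above) =====
theorem process_spec : Claim_equal_process := by
  intro array _
  unfold Spec_process process
  dsimp only
  rw [process_alt_eq, process_collisions]
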